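-- pv_equiv track=rewrite | github.com/OmerISharon/Presence0.1 | Creator/GodModeNotes/Code/Creator_GodModeNotes.py | extract_offline_title
-- ===== SOURCE A (Python) =====
-- def extract_offline_title(text):
--     """
--     In offline mode, returns a title that ends at the first punctuation
--     (, . ! ? : ;) within the first 10 words, or if none found, the first
--     10 words followed by '...' if there's more.
--     """
--     # Split into words
--     words = text.strip().split()
--     if not words:
--         return ""  # empty text fallback
--
--     # We'll only look at the first 10 words max
--     snippet_words = words[:10]
--     # Join them so we can find punctuation in the substring
--     snippet_str = " ".join(snippet_words)
--
--     # Allowed punctuation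
--     punctuations = [",", ".", "!", "?", ":", ";"]
--
--     # Find the earliest punctuation index within snippet_str
--     min_index = None
--     for p in punctuations:
--         idx = snippet_str.find(p)
--         if idx != -1:
--             if min_index is None or idx < min_index:
--                 min_index = idx
--
--     # If we found punctuation within snippet_str
--     if min_index is not None:
--         # cut up to that punctuation
--         return snippet_str[: min_index].strip()
--     else:
--         # No punctuation found in the first 10 words
--         # If we have more than 10 words total => add "..."
--         if len(words) > 10:
--             return snippet_str + "..."
--         else:
--             return snippet_str  # 10 or fewer words, no punctuation
-- ===== SOURCE B (Python) =====
-- def extract_offline_title(text):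
--     """Same behaviour as A, but finds the cut point with one left-to-right
--     scan of the snippet instead of six .find() passes plus a running min."""
--     words = text.strip().split()
--     if not words:
--         return ""
--     snippet_str = " ".join(words[:10])
--     puncts = {",", ".", "!", "?", ":", ";"}
--     min_index = None
--     for i, ch in enumerate(snippet_str):
--         if ch in puncts:
--             min_index = i
--             break
--     if min_index is not None:
--         return snippet_str[:min_index].strip()
--     if len(words) > 10:
--         return snippet_str + "..."
--     return snippet_str
-- ===== Notes on version B (the rewrite author's own statement) =====
-- stated objective: simpler
-- what changed: replaces the six-find-then-running-min block over the punctuation list with a single left-to-right scan of the snippet that stops at the first punctuation character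
import Mathlib
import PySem

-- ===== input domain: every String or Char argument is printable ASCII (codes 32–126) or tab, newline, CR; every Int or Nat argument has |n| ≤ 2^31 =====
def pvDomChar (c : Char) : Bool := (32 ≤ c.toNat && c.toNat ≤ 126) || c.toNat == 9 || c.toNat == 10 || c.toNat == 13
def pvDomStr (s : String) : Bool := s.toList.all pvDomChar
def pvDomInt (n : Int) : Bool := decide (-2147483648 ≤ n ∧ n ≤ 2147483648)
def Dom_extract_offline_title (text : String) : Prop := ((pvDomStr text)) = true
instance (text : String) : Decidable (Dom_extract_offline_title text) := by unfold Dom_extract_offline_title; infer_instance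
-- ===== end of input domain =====

-- B replaces A's six-`find`-then-running-min block by one left-to-right scan of the
-- snippet that stops at the first punctuation character; objective: simpler.

-- ===== PORT A =====
-- A's loop "for p in punctuations: idx = snippet_str.find(p); if idx != -1: ..." as a foldl
def aMinIndex (snippet_str : String) : Option Int :=
  [",", ".", "!", "?", ":", ";"].foldl (fun min_index p =>
    let idx := PySem.Str.find snippet_str p
    if idx ≠ -1 then
      match min_index with
      | none => some idx
      | some m => if idx < m then some idx else min_index
    else min_index) none

def extract_offline_title (text : String) : String :=
  let words := PySem.Str.split₀ (PySem.Str.strip text)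
  if words = [] then ""
  else
    let snippet_words := PySem.List.slice words none (some 10)
    let snippet_str := PySem.Str.join " " snippet_words
    match aMinIndex snippet_str with
    | some m => PySem.Str.strip (PySem.Str.slice snippet_str none (some m))
    | none =>
      if words.length > 10 then
        -- snippet_str + "..." : concatenation on code points (exact for Python str +)
        String.ofList (snippet_str.toList ++ "...".toList)
      else snippet_str

-- ===== PORT B =====
-- B's "for i, ch in enumerate(snippet_str): if ch in puncts: min_index = i; break"
-- is the first index whose character lies in the punctuation set: List.findIdx?
def extract_offline_title_alt (text : String) : String :=
  let words := PySem.Str.split₀ (PySem.Str.strip text)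
  if words = [] then ""
  else
    let snippet_str := PySem.Str.join " " (PySem.List.slice words none (some 10))
    let puncts : PySem.Set Char := PySem.Set.ofList [',', '.', '!', '?', ':', ';']
    match snippet_str.toList.findIdx? (fun ch => puncts.contains ch) with
    | some i => PySem.Str.strip (PySem.Str.slice snippet_str none (some (i : Int)))
    | none =>
      if words.length > 10 then
        String.ofList (snippet_str.toList ++ "...".toList)
      else snippet_str

-- ===== PRECONDITION & SPEC =====
def Spec_extract_offline_title (text : String) (out : String) : Prop := out = extract_offline_title_alt text
instance (text : String) (out : String) : Decidable (Spec_extract_offline_title text out) := by unfold Spec_extract_offline_title; infer_instance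

-- ===== CLAIM (what is proved, stated in full; the proofs are below) =====
def Claim_equal_extract_offline_title : Prop := ∀ (text : String), Dom_extract_offline_title text → Spec_extract_offline_title text (extract_offline_title text)

-- ===== LEMMAS AND PROOFS =====

-- A's fold, restated over chars (pattern list as single chars)
def pvStep (cs : List Char) (min_index : Option Int) (p : Char) : Option Int :=
  let idx := PySem.Chars.find cs [p]
  if idx ≠ -1 then
    match min_index with
    | none => some idx
    | some m => if idx < m then some idx else min_index
  else min_index

def pvFold (cs : List Char) (ps : List Char) (acc : Option Int) : Option Int :=
  ps.foldl (pvStep cs) acc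

theorem aMinIndex_eq_pvFold (s : String) :
    aMinIndex s = pvFold s.toList [',', '.', '!', '?', ':', ';'] none := by
  simp [aMinIndex, pvFold, pvStep, List.foldl, PySem.Str.find_eq]

theorem singleton_prefix_iff (l : List Char) (a : Char) : [a] <+: l ↔ l.head? = some a := by
  constructor
  · rintro ⟨t, rfl⟩; rfl
  · intro h; cases l with
    | nil => simp at h
    | cons x xs => simp at h; subst h; exact ⟨xs, rfl⟩

theorem singleton_infix_iff (l : List Char) (a : Char) : [a] <:+: l ↔ a ∈ l := by
  constructor
  · intro h; simpa using h.sublist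
  · intro h; obtain ⟨s, t, rfl⟩ := List.append_of_mem h
    exact ⟨s, t, by simp⟩

theorem find_singleton_eq_neg_one_iff (cs : List Char) (p : Char) :
    PySem.Chars.find cs [p] = -1 ↔ p ∉ cs := by
  rw [PySem.Chars.find_eq_neg_one_iff, singleton_infix_iff]

theorem find_singleton_spec (cs : List Char) (p : Char) (h : p ∈ cs) :
    0 ≤ PySem.Chars.find cs [p] ∧
    cs[(PySem.Chars.find cs [p]).toNat]? = some p ∧
    ∀ j < (PySem.Chars.find cs [p]).toNat, cs[j]? ≠ some p := by
  have hne : PySem.Chars.find cs [p] ≠ -1 := fun hc =>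
    absurd h ((find_singleton_eq_neg_one_iff cs p).mp hc)
  have hge : 0 ≤ PySem.Chars.find cs [p] := by
    have := PySem.Chars.neg_one_le_find cs [p]; omega
  obtain ⟨h1, h2⟩ := PySem.Chars.find_spec hge
  refine ⟨hge, ?_, ?_⟩
  · rw [← List.head?_drop]; exact (singleton_prefix_iff _ _).mp h1
  · intro j hj hc
    exact h2 j hj ((singleton_prefix_iff _ _).mpr (by rw [List.head?_drop]; exact hc))

theorem pvFold_none_iff (cs : List Char) (ps : List Char) : ∀ acc,
    pvFold cs ps acc = none ↔ (acc = none ∧ ∀ p ∈ ps, PySem.Chars.find cs [p] = -1) := by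
  induction ps with
  | nil => intro acc; simp [pvFold]
  | cons p ps ih =>
    intro acc
    rw [show pvFold cs (p :: ps) acc = pvFold cs ps (pvStep cs acc p) from rfl, ih]
    by_cases hp : PySem.Chars.find cs [p] = -1
    · simp [pvStep, hp]
    · cases acc with
      | none => simp [pvStep, hp]
      | some m =>
        by_cases hlt : PySem.Chars.find cs [p] < m <;> simp [pvStep, hp, hlt]

theorem pvFold_some (cs : List Char) (ps : List Char) : ∀ acc m,
    pvFold cs ps acc = some m →
    (acc = some m ∨ ∃ p ∈ ps, PySem.Chars.find cs [p] = m ∧ m ≠ -1) ∧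
    (∀ a, acc = some a → m ≤ a) ∧
    (∀ p ∈ ps, PySem.Chars.find cs [p] ≠ -1 → m ≤ PySem.Chars.find cs [p]) := by
  induction ps with
  | nil =>
    intro acc m h
    simp [pvFold] at h
    exact ⟨Or.inl h, by rintro a rfl; simp_all, by simp⟩
  | cons p ps ih =>
    intro acc m h
    rw [show pvFold cs (p :: ps) acc = pvFold cs ps (pvStep cs acc p) from rfl] at h
    by_cases hp : PySem.Chars.find cs [p] = -1
    · have hh := ih acc m (by simpa [pvStep, hp] using h)
      refine ⟨?_, hh.2.1, ?_⟩
      · rcases hh.1 with h1 | ⟨q, hq, hf⟩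
        · exact Or.inl h1
        · exact Or.inr ⟨q, List.mem_cons_of_mem _ hq, hf⟩
      · intro q hq hf
        rcases List.mem_cons.mp hq with rfl | hq'
        · exact absurd hp hf
        · exact hh.2.2 q hq' hf
    · -- find ≠ -1
      cases acc with
      | none =>
        have hh := ih (some (PySem.Chars.find cs [p])) m (by simpa [pvStep, hp] using h)
        refine ⟨?_, by rintro a h; simp at h, ?_⟩
        · rcases hh.1 with h1 | ⟨q, hq, hf⟩
          · exact Or.inr ⟨p, List.mem_cons_self, by
              simp at h1; exact ⟨h1, h1 ▸ hp⟩⟩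
          · exact Or.inr ⟨q, List.mem_cons_of_mem _ hq, hf⟩
        · intro q hq hf
          rcases List.mem_cons.mp hq with rfl | hq'
          · exact hh.2.1 _ rfl
          · exact hh.2.2 q hq' hf
      | some a =>
        by_cases hlt : PySem.Chars.find cs [p] < a
        · have hh := ih (some (PySem.Chars.find cs [p])) m (by simpa [pvStep, hp, hlt] using h)
          have hma : m ≤ PySem.Chars.find cs [p] := hh.2.1 _ rfl
          refine ⟨?_, ?_, ?_⟩
          · rcases hh.1 with h1 | ⟨q, hq, hf⟩
            · exact Or.inr ⟨p, List.mem_cons_self, by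
                simp at h1; exact ⟨h1, h1 ▸ hp⟩⟩
            · exact Or.inr ⟨q, List.mem_cons_of_mem _ hq, hf⟩
          · rintro b hb; injection hb with hb; omega
          · intro q hq hf
            rcases List.mem_cons.mp hq with rfl | hq'
            · exact hma
            · exact hh.2.2 q hq' hf
        · have hh := ih (some a) m (by simpa [pvStep, hp, hlt] using h)
          have hma : m ≤ a := hh.2.1 _ rfl
          refine ⟨?_, ?_, ?_⟩
          · rcases hh.1 with h1 | ⟨q, hq, hf⟩
            · exact Or.inl h1
            · exact Or.inr ⟨q, List.mem_cons_of_mem _ hq, hf⟩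
          · rintro b hb; injection hb with hb; omega
          · intro q hq hf
            rcases List.mem_cons.mp hq with rfl | hq'
            · omega
            · exact hh.2.2 q hq' hf

-- the heart: A's running minimum over per-character finds equals B's first-hit scan
theorem pvFold_eq_findIdx? (cs : List Char) (ps : List Char) :
    pvFold cs ps none =
      (cs.findIdx? (fun ch => ps.contains ch)).map (fun i : Nat => (i : Int)) := by
  cases hB : cs.findIdx? (fun ch => ps.contains ch) with
  | none =>
    rw [List.findIdx?_eq_none_iff] at hB
    rw [(pvFold_none_iff cs ps none).mpr ⟨rfl, ?_⟩]
    · rfl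
    · intro p hp
      rw [find_singleton_eq_neg_one_iff]
      intro hpc
      have := hB p hpc
      simp at this
      exact this hp
  | some i =>
    obtain ⟨hi, hpi, hmin⟩ := List.findIdx?_eq_some_iff_getElem.mp hB
    cases hF : pvFold cs ps none with
    | none =>
      exfalso
      obtain ⟨-, hall⟩ := (pvFold_none_iff cs ps none).mp hF
      have hq : cs[i] ∈ ps := by simpa using hpi
      have := (find_singleton_eq_neg_one_iff cs cs[i]).mp (hall _ hq)
      exact this (List.getElem_mem hi)
    | some m =>
      obtain ⟨horig, -, hle⟩ := pvFold_some cs ps none m hF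
      rcases horig with h1 | ⟨p, hp, hfm, hm⟩
      · simp at h1
      · -- 0 ≤ m and cs[m.toNat] = p
        have hpc : p ∈ cs := by
          by_contra hc
          exact hm (by rw [← hfm]; exact (find_singleton_eq_neg_one_iff cs p).mpr hc)
        obtain ⟨hge, hat, -⟩ := find_singleton_spec cs p hpc
        rw [hfm] at hge hat
        -- i ≤ m.toNat : position m.toNat satisfies the predicate
        have hmem : cs[m.toNat]? = some p := hat
        have hlt : m.toNat < cs.length := by
          rcases List.getElem?_eq_some_iff.mp hmem with ⟨hl, h2⟩; exact hl
        have hpred : (fun ch => ps.contains ch) cs[m.toNat] = true := by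
          have : cs[m.toNat] = p := by
            rcases List.getElem?_eq_some_iff.mp hmem with ⟨hl2, he⟩; exact he
          simp [this, hp]
        have h_i_le : i ≤ m.toNat := by
          by_contra hc
          exact hmin m.toNat (by omega) hpred
        -- m ≤ i : the char at i is in ps, its find is ≤ i
        have hq : cs[i] ∈ ps := by simpa using hpi
        have hqc : cs[i] ∈ cs := List.getElem_mem hi
        obtain ⟨hge', -, hmin'⟩ := find_singleton_spec cs cs[i] hqc
        have hfind_le : (PySem.Chars.find cs [cs[i]]).toNat ≤ i := by
          by_contra hc
          exact hmin' i (by omega) (by simp)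
        have hfne : PySem.Chars.find cs [cs[i]] ≠ -1 := by omega
        have := hle cs[i] hq hfne
        have hmi : m = (i : Int) := by omega
        simp [hmi]

theorem extract_offline_title_eq (text : String) :
    extract_offline_title text = extract_offline_title_alt text := by
  unfold extract_offline_title extract_offline_title_alt
  set words := PySem.Str.split₀ (PySem.Str.strip text) with hw
  by_cases hnil : words = []
  · simp [hnil]
  · simp only [if_neg hnil]
    set snippet := PySem.Str.join " " (PySem.List.slice words none (some 10)) with hs
    have hmin : aMinIndex snippet =
        (snippet.toList.findIdx? (fun ch =>
          (PySem.Set.ofList [',', '.', '!', '?', ':', ';']).contains ch)).map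
          (fun i : Nat => (i : Int)) := by
      rw [aMinIndex_eq_pvFold, pvFold_eq_findIdx?]
      rfl
    rw [hmin]
    cases snippet.toList.findIdx? (fun ch =>
        (PySem.Set.ofList [',', '.', '!', '?', ':', ';']).contains ch) with
    | none => rfl
    | some i => rfl

-- ===== VERDICT (by name: the statement is the Claim_ definition above) =====
theorem extract_offline_title_spec : Claim_equal_extract_offline_title := by
  intro text _
  exact extract_offline_title_eq text
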